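-- pv_equiv track=rewrite | github.com/bianca-mihaela-stan/Knowledge-representation | Candy crush/helpers.py | refactor
-- ===== SOURCE A (Python) =====
-- import copy
--
-- def refactor(node_info):
--     """
--     Refactoring the board after every move.
--      Args:
--         node_info list(list(char)): A configuration of the board
--     Returns:
--         list(list(char)): A new configuration of the board
--     """
--     # the fall
--     for x in range(len(node_info)-1, -1, -1):
--         for y in range(len(node_info[x])-1, -1, -1):
--             x_copy = copy.deepcopy(x)
--             y_copy = copy.deepcopy(y)
--             z = x_copy+1
--             while z<=len(node_info)-1 and node_info[x_copy][y_copy]!='#' and node_info[z][y_copy]=='#':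
--                 node_info[z][y_copy] = node_info[x_copy][y_copy]
--                 node_info[x_copy][y_copy] = '#'
--                 x_copy+=1
--                 z+=1
--     # the right shift
--     for x in range(len(node_info)):
--         for y in range(len(node_info[x])):
--             x_copy = copy.deepcopy(x)
--             y_copy = copy.deepcopy(y)
--             z = y-1
--             while z>=0 and node_info[x_copy][y_copy]!='#' and node_info[x_copy][z]=='#':
--                 node_info[x_copy][z]=node_info[x_copy][y_copy]
--                 node_info[x_copy][y_copy]='#'
--                 y_copy-=1
--                 z-=1
--
--     return node_info
-- ===== SOURCE B (Python) =====
-- def refactor(node_info):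
--     """Gravity-fall then left-pack via per-column / per-row stable compaction."""
--     R = len(node_info)
--     if R == 0:
--         return node_info
--     C = len(node_info[0])
--     cols = []
--     for y in range(C):
--         vals = [node_info[x][y] for x in range(R) if node_info[x][y] != '#']
--         cols.append(['#'] * (R - len(vals)) + vals)
--     result = []
--     for x in range(R):
--         vals = [cols[y][x] for y in range(C) if cols[y][x] != '#']
--         result.append(vals + ['#'] * (C - len(vals)))
--     return result
-- ===== Notes on version B (the rewrite author's own statement) =====
-- stated objective: faster
-- what changed: Replaces A's cell-by-cell bubbling (a while-loop sliding each cell through empties, per cell) by one-pass stable compaction: per column collect the non-'#' cells and pad with '#' on top, then per row collect non-'#' and pad on the right.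
-- outside the precondition, e.g. on refactor([['a'], ['b', 'c']]): A returns [['a'], ['b', 'c']], B returns [['a'], ['b']]
import Mathlib
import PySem

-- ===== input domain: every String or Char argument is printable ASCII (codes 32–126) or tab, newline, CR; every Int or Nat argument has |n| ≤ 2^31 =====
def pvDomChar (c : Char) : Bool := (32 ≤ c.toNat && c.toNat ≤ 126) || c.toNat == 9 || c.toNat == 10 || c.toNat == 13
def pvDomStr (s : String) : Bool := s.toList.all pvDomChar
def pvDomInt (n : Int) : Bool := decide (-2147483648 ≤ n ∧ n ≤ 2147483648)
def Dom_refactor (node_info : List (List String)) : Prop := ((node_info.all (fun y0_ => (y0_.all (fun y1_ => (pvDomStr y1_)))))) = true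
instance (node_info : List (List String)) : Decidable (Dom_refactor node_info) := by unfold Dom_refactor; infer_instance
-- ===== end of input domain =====

-- B replaces A's per-cell bubbling loops by per-column / per-row stable compaction (collect non-'#', pad with '#').
-- Note: Python A mutates node_info in place and returns it; B builds a fresh board — the equivalence proved here is about the RETURN value only.

-- ===== PORT A =====
-- helpers: in-range 2-D read/write (inside Pre_ every index A uses is nonnegative and in range)
def pvRow (b : List (List String)) (i : Int) : List String := (PySem.List.pyGet? b i).getD []
def pvGetA (b : List (List String)) (i j : Int) : String := (PySem.List.pyGet? (pvRow b i) j).getD ""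
def pvSetA (b : List (List String)) (i j : Int) (v : String) : List (List String) :=
  b.set i.toNat ((pvRow b i).set j.toNat v)

-- the phase-1 while loop (fuel-bounded; fuel = board height always suffices since z strictly increases)
def fall1 : Nat → Int → Int → Int → List (List String) → List (List String)
  | 0, _, _, _, b => b
  | f+1, xc, y, z, b =>
    if z ≤ (b.length : Int) - 1 ∧ pvGetA b xc y ≠ "#" ∧ pvGetA b z y = "#" then
      fall1 f (xc+1) y (z+1) (pvSetA (pvSetA b z y (pvGetA b xc y)) xc y "#")
    else b

-- the phase-2 while loop (fuel = y+1 suffices since z strictly decreases from y-1 to ≥ 0)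
def fall2 : Nat → Int → Int → Int → List (List String) → List (List String)
  | 0, _, _, _, b => b
  | f+1, x, yc, z, b =>
    if 0 ≤ z ∧ pvGetA b x yc ≠ "#" ∧ pvGetA b x z = "#" then
      fall2 f x (yc-1) (z-1) (pvSetA (pvSetA b x z (pvGetA b x yc)) x yc "#")
    else b

def refactor (node_info : List (List String)) : List (List String) :=
  let R : Int := node_info.length
  -- the fall
  let b1 := (PySem.List.pyRange (R-1) (-1) (-1)).foldl (fun acc x =>
    (PySem.List.pyRange (((pvRow acc x).length : Int) - 1) (-1) (-1)).foldl (fun acc2 y =>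
      fall1 acc2.length x y (x+1) acc2) acc) node_info
  -- the right shift
  (PySem.List.pyRange 0 R 1).foldl (fun acc x =>
    (PySem.List.pyRange 0 ((pvRow acc x).length : Int) 1).foldl (fun acc2 y =>
      fall2 (y.toNat+1) x y (y-1) acc2) acc) b1

-- ===== PORT B =====
def refactor_alt (node_info : List (List String)) : List (List String) :=
  let R := node_info.length
  if R = 0 then node_info else
  let C := (node_info.headD []).length
  let cols := (List.range C).map (fun y =>
    let vals := ((List.range R).map (fun x => (node_info.getD x []).getD y "")).filter (fun s => s ≠ "#")
    List.replicate (R - vals.length) "#" ++ vals)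
  (List.range R).map (fun x =>
    let vals := ((List.range C).map (fun y => (cols.getD y []).getD x "")).filter (fun s => s ≠ "#")
    vals ++ List.replicate (C - vals.length) "#")

-- ===== PRECONDITION & SPEC =====
-- Pre_ excludes non-rectangular boards: outside the natural (rectangular) board domain A's column fall
-- either raises IndexError or reads/writes only the ragged fragments of columns, an accident of its shape.
def Pre_refactor (node_info : List (List String)) : Prop :=
  ∀ r ∈ node_info, r.length = (node_info.headD []).length
instance (node_info : List (List String)) : Decidable (Pre_refactor node_info) := by
  unfold Pre_refactor; infer_instance

def pvWitness_refactor : List (List String) := [["a", "#"], ["#", "b"]]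

def Spec_refactor (node_info : List (List String)) (out : List (List String)) : Prop := out = refactor_alt node_info
instance (node_info : List (List String)) (out : List (List String)) : Decidable (Spec_refactor node_info out) := by unfold Spec_refactor; infer_instance

-- ===== CLAIM (what is proved, stated in full; the proofs are below) =====
def Claim_equal_refactor : Prop := ∀ (node_info : List (List String)), Dom_refactor node_info → Pre_refactor node_info → Spec_refactor node_info (refactor node_info)

-- ===== LEMMAS AND PROOFS =====

-- board abstraction used by the proofs
def Rect (b : List (List String)) (C : Nat) : Prop := ∀ r ∈ b, r.length = C
def colOf (b : List (List String)) (y : Nat) : List String := b.map (fun r => r.getD y "")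
def setCol (b : List (List String)) (y : Nat) (cs : List String) : List (List String) :=
  List.zipWith (fun r v => r.set y v) b cs

-- single-column version of A's phase-1 while loop (z = x+1 kept implicit)
def cfall : Nat → Nat → List String → List String
  | 0, _, cs => cs
  | f+1, x, cs =>
    if x+2 ≤ cs.length ∧ cs.getD x "" ≠ "#" ∧ cs.getD (x+1) "" = "#" then
      cfall f (x+1) ((cs.set (x+1) (cs.getD x "")).set x "#")
    else cs

-- single-row version of A's phase-2 while loop (z = y-1 kept implicit)
def rfall : Nat → Nat → List String → List String
  | 0, _, r => r
  | f+1, y, r =>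
    if 1 ≤ y ∧ r.getD y "" ≠ "#" ∧ r.getD (y-1) "" = "#" then
      rfall f (y-1) ((r.set (y-1) (r.getD y "")).set y "#")
    else r

-- phase 1 per column: process positions m-1, m-2, …, 0 (largest first)
def gdown (fuel : Nat) : Nat → List String → List String
  | 0, cs => cs
  | m+1, cs => gdown fuel m (cfall fuel m cs)

-- phase 2 per row: process positions 0, 1, …, m-1 (0 first)
def lup : Nat → List String → List String
  | 0, r => r
  | m+1, r => rfall (m+1) m (lup m r)

-- gravity compaction (pad on top) and left compaction (pad on the right)
def compactD (l : List String) : List String :=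
  List.replicate (l.length - (l.filter (· ≠ "#")).length) "#" ++ l.filter (· ≠ "#")
def compactL (l : List String) : List String :=
  l.filter (· ≠ "#") ++ List.replicate (l.length - (l.filter (· ≠ "#")).length) "#"


theorem length_cfall : ∀ (f x : Nat) (cs : List String), (cfall f x cs).length = cs.length
  | 0, _, _ => rfl
  | f+1, x, cs => by
    rw [cfall]
    split
    · rw [length_cfall f]; simp
    · rfl

theorem length_rfall : ∀ (f y : Nat) (r : List String), (rfall f y r).length = r.length
  | 0, _, _ => rfl
  | f+1, y, r => by
    rw [rfall]
    split
    · rw [length_rfall f]; simp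
    · rfl

theorem length_colOf (b : List (List String)) (y : Nat) : (colOf b y).length = b.length := by
  simp [colOf]

theorem getElem_colOf {b : List (List String)} {y i : Nat} (h : i < (colOf b y).length) :
    (colOf b y)[i] = (b[i]'(by simpa [colOf] using h)).getD y "" := List.getElem_map ..

theorem getElem_setCol {b : List (List String)} {y : Nat} {cs : List String} {i : Nat}
    (h : i < (setCol b y cs).length) :
    (setCol b y cs)[i] = (b[i]'(by simp only [setCol, List.length_zipWith] at h; omega)).set y
      (cs[i]'(by simp only [setCol, List.length_zipWith] at h; omega)) := List.getElem_zipWith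

theorem colOf_getD (b : List (List String)) (y x : Nat) :
    (colOf b y).getD x "" = (b.getD x []).getD y "" := by
  simp only [colOf, List.getD_eq_getElem?_getD, List.getElem?_map]
  cases h : b[x]? <;> simp

theorem pvGetA_eq (b : List (List String)) (i j : Int) (hi : 0 ≤ i) (hj : 0 ≤ j) :
    pvGetA b i j = (b.getD i.toNat []).getD j.toNat "" := by
  simp only [pvGetA, pvRow, PySem.List.pyGet?_of_nonneg _ hi, PySem.List.pyGet?_of_nonneg _ hj,
    List.getD_eq_getElem?_getD]

theorem length_setCol (b : List (List String)) (y : Nat) (cs : List String)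
    (h : cs.length = b.length) : (setCol b y cs).length = b.length := by
  simp [setCol, h]

theorem Rect_setCol {b : List (List String)} {C y : Nat} {cs : List String}
    (hb : Rect b C) : Rect (setCol b y cs) C := by
  intro r hr
  obtain ⟨i, hi, rfl⟩ := List.mem_iff_getElem.mp hr
  rw [getElem_setCol hi, List.length_set]
  exact hb _ (List.getElem_mem _)

theorem setCol_colOf_self {C : Nat} {b : List (List String)} {y : Nat}
    (hb : Rect b C) (hy : y < C) : setCol b y (colOf b y) = b := by
  apply List.ext_getElem
  · simp [setCol, colOf]
  · intro i h1 h2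
    rw [getElem_setCol h1, getElem_colOf]
    have hyr : y < b[i].length := by rw [hb b[i] (List.getElem_mem _)]; exact hy
    rw [List.getD_eq_getElem?_getD, List.getElem?_eq_getElem hyr]
    simp [List.set_getElem_self]

theorem setCol_setCol {b : List (List String)} {y : Nat} {cs d : List String}
    (h : cs.length = b.length) : setCol (setCol b y cs) y d = setCol b y d := by
  apply List.ext_getElem
  · simp [setCol, h]
  · intro i h1 h2
    rw [getElem_setCol h1, getElem_setCol (by simp only [setCol, List.length_zipWith] at h1 ⊢; omega),
      getElem_setCol h2]
    exact List.set_set ..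

theorem colOf_setCol_self {C : Nat} {b : List (List String)} {y : Nat} {cs : List String}
    (hb : Rect b C) (hy : y < C) (h : cs.length = b.length) : colOf (setCol b y cs) y = cs := by
  apply List.ext_getElem
  · simp [colOf, setCol, h]
  · intro i h1 h2
    rw [getElem_colOf h1, getElem_setCol (by simpa [colOf] using h1)]
    have hib : i < b.length := by simp only [colOf, setCol, List.length_map, List.length_zipWith] at h1; omega
    have hyr : y < b[i].length := by rw [hb b[i] (List.getElem_mem hib)]; exact hy
    rw [List.getD_eq_getElem?_getD, List.getElem?_eq_getElem (by simpa [List.length_set] using hyr)]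
    simp

theorem colOf_setCol_ne {b : List (List String)} {y w : Nat} {cs : List String}
    (h : cs.length = b.length) (hne : w ≠ y) : colOf (setCol b y cs) w = colOf b w := by
  apply List.ext_getElem
  · simp [colOf, setCol, h]
  · intro i h1 h2
    rw [getElem_colOf h1, getElem_colOf h2, getElem_setCol (by simpa [colOf] using h1)]
    rw [List.getD_eq_getElem?_getD, List.getD_eq_getElem?_getD,
      List.getElem?_set_ne (by omega)]

theorem pvSetA_setCol {C : Nat} {b : List (List String)} (i y : Int) (v : String)
    (hb : Rect b C) (hi : 0 ≤ i) (hy0 : 0 ≤ y) (hy : y.toNat < C) :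
    pvSetA b i y v = setCol b y.toNat ((colOf b y.toNat).set i.toNat v) := by
  have hrow : pvRow b i = b.getD i.toNat [] := by
    simp [pvRow, PySem.List.pyGet?_of_nonneg _ hi, List.getD_eq_getElem?_getD]
  apply List.ext_getElem
  · simp [pvSetA, setCol, colOf, List.length_set]
  · intro k h1 h2
    have hkb : k < b.length := by simpa [pvSetA] using h1
    rw [getElem_setCol h2]
    have hkc : k < ((colOf b y.toNat).set i.toNat v).length := by
      simp only [List.length_set, length_colOf]; omega
    have hyr : y.toNat < b[k].length := by rw [hb b[k] (List.getElem_mem hkb)]; exact hy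
    by_cases hk : i.toNat = k
    · subst hk
      have e : (pvSetA b i y v)[i.toNat]'h1 = (pvRow b i).set y.toNat v := by
        simp only [pvSetA]
        exact List.getElem_set_self _
      rw [e, hrow, List.getD_eq_getElem?_getD, List.getElem?_eq_getElem hkb]
      have e2 : ((colOf b y.toNat).set i.toNat v)[i.toNat]'hkc = v := List.getElem_set_self _
      rw [e2]
      rfl
    · have e : (pvSetA b i y v)[k]'h1 = b[k] := by
        simp only [pvSetA]
        rw [List.getElem_set]
        simp [hk]
      rw [e]
      have hco : k < (colOf b y.toNat).length := by simpa [colOf] using hkb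
      have e2 : ((colOf b y.toNat).set i.toNat v)[k]'hkc = (colOf b y.toNat)[k]'hco := by
        have h3 := List.getElem?_set_ne (l := colOf b y.toNat) (a := v) (i := i.toNat) (j := k) hk
        rw [List.getElem?_eq_getElem hkc, List.getElem?_eq_getElem hco] at h3
        exact Option.some.inj h3
      rw [e2, getElem_colOf]
      rw [List.getD_eq_getElem?_getD, List.getElem?_eq_getElem hyr]
      exact (List.set_getElem_self hyr).symm

theorem cond1_iff {b : List (List String)} {xc y : Int}
    (hxc : 0 ≤ xc) (hy0 : 0 ≤ y) :
    (xc + 1 ≤ (b.length : Int) - 1 ∧ pvGetA b xc y ≠ "#" ∧ pvGetA b (xc+1) y = "#")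
    ↔ (xc.toNat + 2 ≤ (colOf b y.toNat).length ∧ (colOf b y.toNat).getD xc.toNat "" ≠ "#"
        ∧ (colOf b y.toNat).getD (xc.toNat + 1) "" = "#") := by
  rw [pvGetA_eq b xc y hxc hy0, pvGetA_eq b (xc+1) y (by omega) hy0,
    colOf_getD, colOf_getD, length_colOf]
  have h1 : (xc+1).toNat = xc.toNat + 1 := by omega
  rw [h1]
  constructor
  · rintro ⟨h, h2, h3⟩; exact ⟨by omega, h2, h3⟩
  · rintro ⟨h, h2, h3⟩; exact ⟨by omega, h2, h3⟩

theorem set_getD_self (b : List (List String)) (x : Nat) : b.set x (b.getD x []) = b := by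
  by_cases h : x < b.length
  · rw [List.getD_eq_getElem?_getD, List.getElem?_eq_getElem h]
    exact List.set_getElem_self h
  · exact List.set_eq_of_length_le (by omega)

theorem L_fall1 (C : Nat) : ∀ (f : Nat) (b : List (List String)) (xc y : Int),
    Rect b C → 0 ≤ xc → 0 ≤ y → y.toNat < C →
    fall1 f xc y (xc+1) b = setCol b y.toNat (cfall f xc.toNat (colOf b y.toNat)) := by
  intro f
  induction f with
  | zero =>
    intro b xc y hb _ _ hyC
    rw [fall1, cfall, setCol_colOf_self hb hyC]
  | succ f ih =>
    intro b xc y hb hxc hy0 hyC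
    have ht : (xc+1).toNat = xc.toNat + 1 := by omega
    rw [fall1, cfall]
    by_cases hc : xc + 1 ≤ (b.length : Int) - 1 ∧ pvGetA b xc y ≠ "#" ∧ pvGetA b (xc+1) y = "#"
    · rw [if_pos hc, if_pos ((cond1_iff hxc hy0).mp hc)]
      have hv : pvGetA b xc y = (colOf b y.toNat).getD xc.toNat "" := by
        rw [pvGetA_eq b xc y hxc hy0, colOf_getD]
      have hb1 : pvSetA b (xc+1) y (pvGetA b xc y)
          = setCol b y.toNat ((colOf b y.toNat).set ((xc+1).toNat) (pvGetA b xc y)) :=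
        pvSetA_setCol (xc+1) y _ hb (by omega) hy0 hyC
      have hlen1 : (((colOf b y.toNat).set ((xc+1).toNat) (pvGetA b xc y))).length = b.length := by
        simp [length_colOf]
      have hlen2 : ((((colOf b y.toNat).set ((xc+1).toNat) (pvGetA b xc y))).set xc.toNat "#").length = b.length := by
        simp [length_colOf]
      rw [hb1, pvSetA_setCol xc y _ (Rect_setCol hb) hxc hy0 hyC,
        colOf_setCol_self hb hyC hlen1, setCol_setCol hlen1,
        ih _ (xc+1) y (Rect_setCol hb) (by omega) hy0 hyC,
        colOf_setCol_self hb hyC hlen2, setCol_setCol hlen2, ht, hv]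
    · rw [if_neg hc, if_neg (fun hn => hc ((cond1_iff hxc hy0).mpr hn)), setCol_colOf_self hb hyC]

theorem L_fall2 : ∀ (f : Nat) (b : List (List String)) (x yc : Int), 0 ≤ x → 0 ≤ yc →
    fall2 f x yc (yc-1) b = b.set x.toNat (rfall f yc.toNat (b.getD x.toNat [])) := by
  intro f
  induction f with
  | zero =>
    intro b x yc _ _
    rw [fall2, rfall, set_getD_self]
  | succ f ih =>
    intro b x yc hx hyc
    have hrow : pvRow b x = b.getD x.toNat [] := by
      simp [pvRow, PySem.List.pyGet?_of_nonneg _ hx, List.getD_eq_getElem?_getD]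
    rw [fall2, rfall]
    by_cases hyc1 : 1 ≤ yc
    · have ht : (yc-1).toNat = yc.toNat - 1 := by omega
      have hco : (0 ≤ yc - 1 ∧ pvGetA b x yc ≠ "#" ∧ pvGetA b x (yc-1) = "#")
          ↔ (1 ≤ yc.toNat ∧ (b.getD x.toNat []).getD yc.toNat "" ≠ "#"
              ∧ (b.getD x.toNat []).getD (yc.toNat - 1) "" = "#") := by
        rw [pvGetA_eq b x yc hx hyc, pvGetA_eq b x (yc-1) hx (by omega), ht]
        constructor
        · rintro ⟨_, h2, h3⟩; exact ⟨by omega, h2, h3⟩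
        · rintro ⟨_, h2, h3⟩; exact ⟨by omega, h2, h3⟩
      by_cases hcn : 0 ≤ yc - 1 ∧ pvGetA b x yc ≠ "#" ∧ pvGetA b x (yc-1) = "#"
      · rw [if_pos hcn, if_pos (hco.mp hcn)]
        have hxlt : x.toNat < b.length := by
          by_contra hge
          have : b.getD x.toNat [] = [] := by
            rw [List.getD_eq_getElem?_getD, List.getElem?_eq_none (by omega)]; rfl
          have h3 := (hco.mp hcn).2.2
          rw [this] at h3
          simp [List.getD] at h3
        have hv : pvGetA b x yc = (b.getD x.toNat []).getD yc.toNat "" := pvGetA_eq b x yc hx hyc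
        -- first write
        have e1 : pvSetA b x (yc-1) (pvGetA b x yc)
            = b.set x.toNat ((b.getD x.toNat []).set (yc.toNat - 1) (pvGetA b x yc)) := by
          rw [pvSetA, hrow, ht]
        -- second write
        have hrow2 : pvRow (b.set x.toNat ((b.getD x.toNat []).set (yc.toNat - 1) (pvGetA b x yc))) x
            = (b.getD x.toNat []).set (yc.toNat - 1) (pvGetA b x yc) := by
          simp only [pvRow, PySem.List.pyGet?_of_nonneg _ hx]
          rw [List.getElem?_set_self (by simpa using hxlt)]
          rfl
        have e2 : pvSetA (b.set x.toNat ((b.getD x.toNat []).set (yc.toNat - 1) (pvGetA b x yc))) x yc "#"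
            = b.set x.toNat (((b.getD x.toNat []).set (yc.toNat - 1) (pvGetA b x yc)).set yc.toNat "#") := by
          rw [pvSetA, hrow2, List.set_set]
        rw [e1, e2, ih _ x (yc-1) hx (by omega), List.set_set, ht]
        have hrd : (b.set x.toNat (((b.getD x.toNat []).set (yc.toNat - 1) (pvGetA b x yc)).set yc.toNat "#")).getD x.toNat []
            = ((b.getD x.toNat []).set (yc.toNat - 1) (pvGetA b x yc)).set yc.toNat "#" := by
          rw [List.getD_eq_getElem?_getD, List.getElem?_set_self (by simpa using hxlt)]
          rfl
        rw [hrd, hv]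
      · rw [if_neg hcn, if_neg (fun hn => hcn (hco.mpr hn)), set_getD_self]
    · have hyc0 : yc = 0 := by omega
      subst hyc0
      rw [if_neg (by simp), if_neg (by simp), set_getD_self]

-- ===== pure-list facts about compaction =====
theorem length_compactD (l : List String) : (compactD l).length = l.length := by
  unfold compactD
  rw [List.length_append, List.length_replicate]
  have := List.length_filter_le (fun s => s ≠ "#") l
  omega

theorem filter_compactD (l : List String) :
    (compactD l).filter (· ≠ "#") = l.filter (· ≠ "#") := by
  unfold compactD
  rw [List.filter_append, List.filter_replicate]
  simp [List.filter_filter]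

theorem compactD_eq_of (l l' : List String) (hlen : l.length = l'.length)
    (hf : l.filter (· ≠ "#") = l'.filter (· ≠ "#")) : compactD l = compactD l' := by
  unfold compactD
  rw [hf, hlen]

theorem compactD_idem (l : List String) : compactD (compactD l) = compactD l := by
  have h := compactD_eq_of (compactD l) l (length_compactD l) (filter_compactD l)
  rw [h]

theorem compactD_cons_hash (l : List String) : compactD ("#" :: l) = "#" :: compactD l := by
  unfold compactD
  rw [List.filter_cons_of_neg (by simp), List.length_cons]
  have hk := List.length_filter_le (fun s => s ≠ "#") l
  rw [show l.length + 1 - (List.filter (fun s => s ≠ "#") l).length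
      = (l.length - (List.filter (fun s => s ≠ "#") l).length) + 1 from by omega]
  rw [List.replicate_succ]
  rfl

theorem compactD_cons_ne (v : String) (l : List String) (hv : v ≠ "#") :
    compactD (v :: l) = List.replicate (l.length - (l.filter (· ≠ "#")).length) "#"
      ++ v :: l.filter (· ≠ "#") := by
  unfold compactD
  rw [List.filter_cons_of_pos (by simpa using hv), List.length_cons, List.length_cons]
  have hk := List.length_filter_le (fun s => s ≠ "#") l
  rw [show l.length + 1 - ((List.filter (fun s => s ≠ "#") l).length + 1)
      = l.length - (List.filter (fun s => s ≠ "#") l).length from by omega]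

-- ===== the phase-1 while loop slides a cell down through '#'s =====
theorem cfall_slide : ∀ (p f m : Nat) (cs q : List String) (v : String),
    p ≤ f → m < cs.length → cs.getD m "" = v → v ≠ "#" →
    cs.drop (m+1) = List.replicate p "#" ++ q → "#" ∉ q →
    cfall f m cs = cs.take m ++ List.replicate p "#" ++ v :: q := by
  intro p
  induction p with
  | zero =>
    intro f m cs q v _ hm hv hvne hdrop hq
    simp only [List.replicate_zero, List.nil_append] at hdrop ⊢
    have hcs : cs = cs.take m ++ v :: q := by
      conv_lhs => rw [← List.take_append_drop m cs]
      rw [List.drop_eq_getElem_cons hm, hdrop]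
      rw [List.getD_eq_getElem?_getD, List.getElem?_eq_getElem hm] at hv
      simp at hv
      rw [hv]
    match f with
    | 0 => rw [cfall]; exact hcs.trans (by simp)
    | f+1 =>
      rw [cfall, if_neg]
      · exact hcs.trans (by simp)
      · rintro ⟨h1, _, h3⟩
        match hq2 : q with
        | [] =>
          have : cs.length = m + 1 := by
            have := congrArg List.length hdrop
            simp at this
            omega
          omega
        | a :: t =>
          have ha : cs.getD (m+1) "" = a := by
            rw [List.getD_eq_getElem?_getD, ← List.getElem?_drop (i := m+1) (j := 0), hdrop]
            rfl
          rw [ha] at h3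
          exact hq (by simp [h3])
  | succ p ih =>
    intro f m cs q v hpf hm hv hvne hdrop hq
    match f with
    | 0 => omega
    | f+1 =>
      have hlen : cs.length = m + 1 + (p + 1) + q.length := by
        have := congrArg List.length hdrop
        simp [List.length_drop] at this
        omega
      have hnext : cs.getD (m+1) "" = "#" := by
        rw [List.getD_eq_getElem?_getD, ← List.getElem?_drop (i := m+1) (j := 0), hdrop]
        simp [List.replicate_succ]
      rw [cfall, if_pos ⟨by omega, hv ▸ hvne, hnext⟩]
      have hm1 : m + 1 < cs.length := by omega
      set cs2 := (cs.set (m+1) (cs.getD m "")).set m "#" with hcs2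
      have hlen2 : cs2.length = cs.length := by simp [hcs2]
      have hv2 : cs2.getD (m+1) "" = v := by
        rw [hcs2, List.getD_eq_getElem?_getD, List.getElem?_set_ne (by omega),
          List.getElem?_set_self (by simpa using hm1), hv]
        rfl
      have hdrop2 : cs2.drop (m+2) = List.replicate p "#" ++ q := by
        rw [hcs2, List.drop_set, if_pos (by omega), List.drop_set, if_pos (by omega)]
        have : cs.drop (m+2) = (cs.drop (m+1)).drop 1 := by
          rw [List.drop_drop]
        rw [this, hdrop]
        simp [List.replicate_succ]
      have := ih f (m+1) cs2 q v (by omega) (by omega) hv2 hvne hdrop2 hq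
      rw [this]
      have htake : cs2.take (m+1) = cs.take m ++ ["#"] := by
        rw [hcs2, List.take_set, List.take_set,
          List.set_eq_of_length_le (l := cs.take (m+1)) (i := m+1) (by rw [List.length_take]; omega),
          List.take_add_one, List.getElem?_eq_getElem hm]
        show (cs.take m ++ [cs[m]]).set m "#" = _
        rw [List.set_append_right m "#" (by rw [List.length_take]; omega),
          List.length_take, show m - min m cs.length = 0 from by omega]
        rfl
      rw [htake]
      simp [List.replicate_succ, List.append_assoc]

theorem cfall_step (f m : Nat) (cs : List String) (hf : cs.length ≤ f)
    (H : cs.drop (m+1) = compactD (cs.drop (m+1))) :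
    cfall f m cs = cs.take m ++ compactD (cs.drop m) := by
  by_cases hm : m < cs.length
  · have hvget : cs.getD m "" = cs[m] := by
      rw [List.getD_eq_getElem?_getD, List.getElem?_eq_getElem hm]; rfl
    by_cases heq : cs.getD m "" = "#"
    · have hdropm : cs.drop m = "#" :: cs.drop (m+1) := by
        rw [List.drop_eq_getElem_cons hm, ← hvget, heq]
      rw [hdropm, compactD_cons_hash, ← H, ← hdropm, List.take_append_drop]
      match f with
      | 0 => rw [cfall]
      | f+1 =>
        rw [cfall, if_neg]
        rintro ⟨_, h2, _⟩
        exact h2 heq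
    · have hdrop : cs.drop (m+1) = List.replicate ((cs.drop (m+1)).length
          - ((cs.drop (m+1)).filter (· ≠ "#")).length) "#" ++ (cs.drop (m+1)).filter (· ≠ "#") := H
      have hq : "#" ∉ (cs.drop (m+1)).filter (· ≠ "#") := by
        intro hmem
        have := (List.mem_filter.mp hmem).2
        simp at this
      have hp : (cs.drop (m+1)).length - ((cs.drop (m+1)).filter (· ≠ "#")).length ≤ f := by
        rw [List.length_drop]; omega
      have hs := cfall_slide _ f m cs _ (cs.getD m "") hp hm rfl heq hdrop hq
      rw [hs]
      have hdropm : cs.drop m = cs.getD m "" :: cs.drop (m+1) := by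
        rw [List.drop_eq_getElem_cons hm, ← hvget]
      rw [hdropm, compactD_cons_ne _ _ heq, ← List.append_assoc]
  · have h1 : cs.drop m = [] := List.drop_eq_nil_of_le (by omega)
    have h2 : cs.take m = cs := List.take_of_length_le (by omega)
    rw [h1, h2, show compactD [] = [] from rfl, List.append_nil]
    match f with
    | 0 => rw [cfall]
    | f+1 =>
      rw [cfall, if_neg]
      rintro ⟨h1, _, _⟩
      omega

theorem gdown_spec : ∀ (m : Nat) (cs : List String) (f : Nat), cs.length ≤ f →
    cs.drop m = compactD (cs.drop m) → gdown f m cs = compactD cs := by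
  intro m
  induction m with
  | zero =>
    intro cs f _ h
    rw [gdown]
    simpa using h
  | succ m ih =>
    intro cs f hf h
    rw [gdown]
    rw [cfall_step f m cs hf h]
    have hlen' : (cs.take m ++ compactD (cs.drop m)).length = cs.length := by
      rw [List.length_append, length_compactD, List.length_take, List.length_drop]
      omega
    have hdrop' : (cs.take m ++ compactD (cs.drop m)).drop m = compactD (cs.drop m) := by
      by_cases hm : m ≤ cs.length
      · rw [List.drop_append_of_le_length (by rw [List.length_take]; omega),
          List.drop_eq_nil_of_le (by rw [List.length_take]; omega), List.nil_append]
      · have hnil : cs.drop m = [] := List.drop_eq_nil_of_le (by omega)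
        rw [hnil, show compactD [] = [] from rfl, List.append_nil,
          List.take_of_length_le (by omega), hnil]
    have hfilter : (cs.take m ++ compactD (cs.drop m)).filter (· ≠ "#") = cs.filter (· ≠ "#") := by
      rw [List.filter_append, filter_compactD, ← List.filter_append, List.take_append_drop]
    have := ih (cs.take m ++ compactD (cs.drop m)) f (by omega)
      (by rw [hdrop', compactD_idem, ← hdrop'])
    rw [this]
    exact compactD_eq_of _ _ hlen' hfilter


theorem getD_concat_right (u t : List String) (k : Nat) :
    (u ++ t).getD (u.length + k) "" = t.getD k "" := by
  rw [List.getD_append_right _ _ _ _ (by omega), show u.length + k - u.length = k from by omega]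

theorem set_concat_right (u t : List String) (k : Nat) (a : String) :
    (u ++ t).set (u.length + k) a = u ++ t.set k a := by
  rw [List.set_append_right _ _ (by omega), show u.length + k - u.length = k from by omega]

theorem getD_replicate_append_self (n : Nat) (t : List String) :
    (List.replicate n "#" ++ t).getD n "" = t.getD 0 "" := by
  rw [List.getD_append_right _ _ _ _ (by simp),
    show n - (List.replicate n "#").length = 0 from by simp]

theorem set_replicate_append_self (n : Nat) (t : List String) (a : String) :
    (List.replicate n "#" ++ t).set n a = List.replicate n "#" ++ t.set 0 a := by
  rw [List.set_append_right _ _ (by simp),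
    show n - (List.replicate n "#").length = 0 from by simp]

theorem getD_block (u : List String) (n : Nat) (t : List String) (k : Nat)
    (hk : k = u.length + n) :
    (u ++ (List.replicate n "#" ++ t)).getD k "" = t.getD 0 "" := by
  subst hk
  rw [getD_concat_right, getD_replicate_append_self]

theorem rfall_slide : ∀ (p f : Nat) (u w : List String) (v : String),
    p ≤ f → v ≠ "#" → "#" ∉ u →
    rfall f (u.length + p) (u ++ (List.replicate p "#" ++ v :: w))
      = u ++ (v :: (List.replicate p "#" ++ w)) := by
  intro p
  induction p with
  | zero =>
    intro f u w v _ hv hu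
    simp only [Nat.add_zero, List.replicate_zero, List.nil_append]
    match f with
    | 0 => rw [rfall]
    | f+1 =>
      rw [rfall, if_neg]
      rintro ⟨h1, _, h3⟩
      match u with
      | [] => simp at h1
      | a :: t =>
        have hlt : (a::t).length - 1 < (a::t).length := by simp
        rw [List.getD_append _ _ _ _ hlt, List.getD_eq_getElem?_getD,
          List.getElem?_eq_getElem hlt] at h3
        simp only [Option.getD_some] at h3
        exact hu (h3 ▸ List.getElem_mem hlt)
  | succ p ih =>
    intro f u w v hpf hv hu
    match f with
    | 0 => omega
    | f+1 =>
      have hrep : List.replicate (p+1) "#" ++ v :: w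
          = List.replicate p "#" ++ ("#" :: v :: w) := by
        rw [List.replicate_succ', List.append_assoc]
        rfl
      have hget_m : (u ++ (List.replicate (p+1) "#" ++ v :: w)).getD (u.length + (p+1)) "" = v :=
        getD_block u (p+1) (v :: w) _ rfl
      have hget_m1 : (u ++ (List.replicate (p+1) "#" ++ v :: w)).getD (u.length + (p+1) - 1) "" = "#" := by
        rw [hrep]
        exact getD_block u p ("#" :: v :: w) _ (by omega)
      rw [rfall, if_pos ⟨by omega, by rw [hget_m]; exact hv, hget_m1⟩, hget_m]
      have hset : ((u ++ (List.replicate (p+1) "#" ++ v :: w)).set (u.length + (p+1) - 1) v).set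
            (u.length + (p+1)) "#"
          = u ++ (List.replicate p "#" ++ v :: "#" :: w) := by
        rw [show u.length + (p+1) - 1 = u.length + p from by omega, hrep, set_concat_right,
          set_replicate_append_self]
        show (u ++ (List.replicate p "#" ++ v :: v :: w)).set (u.length + (p+1)) "#" = _
        rw [show u.length + (p+1) = u.length + (p+1) from rfl, set_concat_right,
          List.set_append_right _ _ (by simp),
          show p + 1 - (List.replicate p "#").length = 1 from by simp]
        rfl
      rw [hset, show u.length + (p+1) - 1 = u.length + p from by omega,
        ih f u ("#" :: w) v (by omega) hv hu, List.replicate_succ', List.append_assoc]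
      rfl

theorem length_lup : ∀ (m : Nat) (r : List String), (lup m r).length = r.length
  | 0, _ => rfl
  | m+1, r => by rw [lup, length_rfall, length_lup m]

theorem lup_spec : ∀ (m : Nat) (r : List String), m ≤ r.length →
    lup m r = compactL (r.take m) ++ r.drop m := by
  intro m
  induction m with
  | zero =>
    intro r _
    rw [lup]
    simp [compactL]
  | succ m ih =>
    intro r hm
    have hrm : m < r.length := by omega
    rw [lup, ih r (by omega)]
    have hnh : "#" ∉ (r.take m).filter (· ≠ "#") := by
      intro h
      have := (List.mem_filter.mp h).2
      simp at this
    have hklen : ((r.take m).filter (· ≠ "#")).length ≤ m := by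
      have := List.length_filter_le (fun s => s ≠ "#") (r.take m)
      have h2 : (r.take m).length = m := by rw [List.length_take]; omega
      omega
    have hcl : compactL (r.take m) = (r.take m).filter (· ≠ "#")
        ++ List.replicate (m - ((r.take m).filter (· ≠ "#")).length) "#" := by
      rw [compactL, List.length_take, show min m r.length = m from by omega]
    have htake1 : r.take (m+1) = r.take m ++ [r[m]] := by
      rw [List.take_add_one, List.getElem?_eq_getElem hrm]
      rfl
    have hdropm : r.drop m = r[m] :: r.drop (m+1) := List.drop_eq_getElem_cons hrm
    rw [hcl, hdropm, List.append_assoc]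
    by_cases hv : r[m] = "#"
    · -- the cell is empty: the while loop does not fire
      have hcond : ((r.take m).filter (· ≠ "#")
            ++ (List.replicate (m - ((r.take m).filter (· ≠ "#")).length) "#"
              ++ r[m] :: r.drop (m+1))).getD m "" = r[m] :=
        getD_block _ _ _ _ (by omega)
      rw [rfall, if_neg (by rintro ⟨_, h2, _⟩; rw [hcond, hv] at h2; exact h2 rfl)]
      rw [htake1, compactL, List.filter_append, List.filter_cons_of_neg (by simp [hv]),
        List.filter_nil, List.append_nil, List.length_append, List.length_take,
        show min m r.length = m from by omega]
      have : m + [r[m]].length - ((r.take m).filter (· ≠ "#")).length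
          = (m - ((r.take m).filter (· ≠ "#")).length) + 1 := by
        simp only [List.length_cons, List.length_nil]
        omega
      rw [this, List.replicate_succ', List.append_assoc, List.append_assoc]
      simp [hv]
    · -- the cell slides left through the '#' block
      have h0 := rfall_slide (m - ((r.take m).filter (· ≠ "#")).length) (m+1)
        ((r.take m).filter (· ≠ "#")) (r.drop (m+1)) r[m] (by omega) hv hnh
      rw [show ((r.take m).filter (· ≠ "#")).length
            + (m - ((r.take m).filter (· ≠ "#")).length) = m from by omega] at h0
      rw [h0, htake1, compactL, List.filter_append, List.filter_cons_of_pos (by simpa using hv),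
        List.filter_nil, List.length_append, List.length_take,
        show min m r.length = m from by omega]
      have : m + [r[m]].length - ((r.take m).filter (· ≠ "#") ++ [r[m]]).length
          = m - ((r.take m).filter (· ≠ "#")).length := by
        simp only [List.length_append, List.length_cons, List.length_nil]
        omega
      rw [this, List.append_assoc]
      simp


theorem pvRow_length {C : Nat} {b : List (List String)} {x : Int}
    (hb : Rect b C) (hx : 0 ≤ x) (hlt : x.toNat < b.length) : (pvRow b x).length = C := by
  rw [pvRow, PySem.List.pyGet?_of_nonneg _ hx, List.getElem?_eq_getElem hlt]
  exact hb _ (List.getElem_mem hlt)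

theorem row_getD_set_self {b : List (List String)} {i : Nat} (v : List String)
    (h : i < b.length) : (b.set i v).getD i [] = v := by
  rw [List.getD_eq_getElem?_getD, List.getElem?_set_self (by simpa using h)]
  rfl

theorem row_getD_set_ne {b : List (List String)} {i j : Nat} (v : List String)
    (h : j ≠ i) : (b.set j v).getD i [] = b.getD i [] := by
  rw [List.getD_eq_getElem?_getD, List.getElem?_set_ne h, List.getD_eq_getElem?_getD]

theorem Rect_set {C : Nat} {b : List (List String)} {i : Nat} {v : List String}
    (hb : Rect b C) (hv : v.length = C) : Rect (b.set i v) C := by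
  intro r hr
  obtain ⟨k, hk, rfl⟩ := List.mem_iff_getElem.mp hr
  rw [List.getElem_set]
  split
  · exact hv
  · exact hb _ (List.getElem_mem _)

theorem map_range_getD {α β : Type} (l : List α) (d : α) (f : α → β) :
    (List.range l.length).map (fun i => f (l.getD i d)) = l.map f := by
  apply List.ext_getElem
  · simp
  · intro i h1 h2
    simp only [List.getElem_map, List.getElem_range, List.length_map] at h2 ⊢
    rw [List.getD_eq_getElem?_getD, List.getElem?_eq_getElem h2]
    rfl

theorem foldl_cfall_pyRange (fuel : Nat) : ∀ (m : Nat) (cs : List String),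
    (PySem.List.pyRange ((m:Int) - 1) (-1) (-1)).foldl (fun c x => cfall fuel x.toNat c) cs
      = gdown fuel m cs := by
  intro m
  induction m with
  | zero =>
    intro cs
    rw [PySem.List.pyRange_neg_one_eq_nil (by omega)]
    rfl
  | succ m ih =>
    intro cs
    rw [show ((m+1 : Nat):Int) - 1 = (m:Int) from by push_cast; ring,
      PySem.List.pyRange_neg_one_cons (by omega), List.foldl_cons, gdown]
    rw [show ((m:Int) - 1) = ((m:Nat):Int) - 1 from rfl] 
    rw [ih (cfall fuel (m:Int).toNat cs), Int.toNat_natCast]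

theorem phase1_inner (C : Nat) (x : Int) (hx : 0 ≤ x) :
    ∀ (ys : List Int) (b : List (List String)), Rect b C →
    (∀ y ∈ ys, 0 ≤ y ∧ y.toNat < C) → ys.Nodup →
    (ys.foldl (fun acc2 y => fall1 acc2.length x y (x+1) acc2) b).length = b.length
    ∧ Rect (ys.foldl (fun acc2 y => fall1 acc2.length x y (x+1) acc2) b) C
    ∧ ∀ w : Nat, w < C →
      colOf (ys.foldl (fun acc2 y => fall1 acc2.length x y (x+1) acc2) b) w
        = if (w : Int) ∈ ys then cfall b.length x.toNat (colOf b w) else colOf b w := by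
  intro ys
  induction ys with
  | nil =>
    intro b hb _ _
    refine ⟨rfl, hb, ?_⟩
    intro w hw
    simp
  | cons y ys ih =>
    intro b hb hmem hnd
    have hy := hmem y (by simp)
    have hstep : fall1 b.length x y (x+1) b
        = setCol b y.toNat (cfall b.length x.toNat (colOf b y.toNat)) :=
      L_fall1 C b.length b x y hb hx hy.1 hy.2
    have hclen : (cfall b.length x.toNat (colOf b y.toNat)).length = b.length := by
      rw [length_cfall, length_colOf]
    have hlen1 : (setCol b y.toNat (cfall b.length x.toNat (colOf b y.toNat))).length = b.length :=
      length_setCol _ _ _ hclen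
    have hrect1 : Rect (setCol b y.toNat (cfall b.length x.toNat (colOf b y.toNat))) C :=
      Rect_setCol hb
    have hih := ih (setCol b y.toNat (cfall b.length x.toNat (colOf b y.toNat))) hrect1
      (fun y' hy' => hmem y' (by simp [hy'])) hnd.of_cons
    rw [List.foldl_cons, hstep]
    refine ⟨by rw [hih.1, hlen1], hih.2.1, ?_⟩
    intro w hw
    rw [hih.2.2 w hw, hlen1]
    by_cases hwy : (w : Int) = y
    · have hwy' : w = y.toNat := by omega
      have hnot : (w : Int) ∉ ys := by
        rw [hwy]
        exact (List.nodup_cons.mp hnd).1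
      rw [if_neg hnot, if_pos (by simp [hwy]), hwy',
        colOf_setCol_self hb hy.2 hclen]
    · have hwy' : w ≠ y.toNat := by omega
      rw [colOf_setCol_ne hclen hwy']
      by_cases hin : (w : Int) ∈ ys
      · rw [if_pos hin, if_pos (by simp [hin])]
      · rw [if_neg hin, if_neg (by simp [hwy, hin])]

theorem phase1_outer (C : Nat) : ∀ (xs : List Int) (b : List (List String)), Rect b C →
    (∀ x ∈ xs, 0 ≤ x ∧ x.toNat < b.length) →
    (xs.foldl (fun acc x =>
      (PySem.List.pyRange (((pvRow acc x).length : Int) - 1) (-1) (-1)).foldl (fun acc2 y =>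
        fall1 acc2.length x y (x+1) acc2) acc) b).length = b.length
    ∧ Rect (xs.foldl (fun acc x =>
      (PySem.List.pyRange (((pvRow acc x).length : Int) - 1) (-1) (-1)).foldl (fun acc2 y =>
        fall1 acc2.length x y (x+1) acc2) acc) b) C
    ∧ ∀ w : Nat, w < C →
      colOf (xs.foldl (fun acc x =>
        (PySem.List.pyRange (((pvRow acc x).length : Int) - 1) (-1) (-1)).foldl (fun acc2 y =>
          fall1 acc2.length x y (x+1) acc2) acc) b) w
        = xs.foldl (fun cs x => cfall b.length x.toNat cs) (colOf b w) := by
  intro xs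
  induction xs with
  | nil =>
    intro b hb _
    exact ⟨rfl, hb, fun w hw => rfl⟩
  | cons x xs ih =>
    intro b hb hmem
    have hx := hmem x (by simp)
    have hys : ∀ y ∈ PySem.List.pyRange ((C:Int) - 1) (-1) (-1), 0 ≤ y ∧ y.toNat < C := by
      intro y hy
      rw [PySem.List.mem_pyRange_neg_one] at hy
      constructor <;> omega
    have hnd : (PySem.List.pyRange ((C:Int) - 1) (-1) (-1)).Nodup := by
      rw [PySem.List.pyRange_neg_one_eq_reverse]
      exact List.nodup_reverse.mpr (PySem.List.nodup_pyRange_one _ _)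
    have hinner := phase1_inner C x hx.1 (PySem.List.pyRange ((C:Int) - 1) (-1) (-1)) b hb hys hnd
    rw [List.foldl_cons, pvRow_length hb hx.1 hx.2]
    have hih := ih _ hinner.2.1 (by
      intro x' hx'
      have := hmem x' (by simp [hx'])
      exact ⟨this.1, by rw [hinner.1]; exact this.2⟩)
    refine ⟨by rw [hih.1, hinner.1], hih.2.1, ?_⟩
    intro w hw
    rw [hih.2.2 w hw, hinner.1, List.foldl_cons,
      hinner.2.2 w hw, if_pos (by rw [PySem.List.mem_pyRange_neg_one]; omega)]


theorem phase2_inner (x : Int) (hx : 0 ≤ x) : ∀ (n : Nat) (b : List (List String)),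
    (PySem.List.pyRange 0 (n:Int) 1).foldl (fun acc2 y => fall2 (y.toNat+1) x y (y-1) acc2) b
      = b.set x.toNat (lup n (b.getD x.toNat [])) := by
  intro n
  induction n with
  | zero =>
    intro b
    rw [show ((0:Nat):Int) = 0 from rfl, PySem.List.pyRange_one_eq_nil le_rfl, List.foldl_nil,
      lup, set_getD_self]
  | succ n ih =>
    intro b
    rw [show ((n+1:Nat):Int) = ((n:Nat):Int)+1 from by push_cast; ring,
      PySem.List.pyRange_one_succ_right (by omega), List.foldl_append, ih,
      List.foldl_cons, List.foldl_nil,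
      L_fall2 ((n:Int).toNat+1) _ x (n:Int) hx (by omega), Int.toNat_natCast]
    by_cases hxb : x.toNat < b.length
    · rw [row_getD_set_self _ hxb, List.set_set, lup]
    · have hbs : ∀ v : List String, b.set x.toNat v = b :=
        fun v => List.set_eq_of_length_le (by omega)
      simp only [hbs]

theorem phase2_outer (C : Nat) : ∀ (xs : List Int) (b : List (List String)), Rect b C →
    (∀ x ∈ xs, 0 ≤ x ∧ x.toNat < b.length) → xs.Nodup →
    (xs.foldl (fun acc x =>
      (PySem.List.pyRange 0 ((pvRow acc x).length : Int) 1).foldl (fun acc2 y =>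
        fall2 (y.toNat+1) x y (y-1) acc2) acc) b).length = b.length
    ∧ ∀ i : Nat, i < b.length →
      (xs.foldl (fun acc x =>
        (PySem.List.pyRange 0 ((pvRow acc x).length : Int) 1).foldl (fun acc2 y =>
          fall2 (y.toNat+1) x y (y-1) acc2) acc) b).getD i []
        = if (i:Int) ∈ xs then lup C (b.getD i []) else b.getD i [] := by
  intro xs
  induction xs with
  | nil =>
    intro b _ _ _
    exact ⟨rfl, fun i _ => by simp⟩
  | cons x xs ih =>
    intro b hb hmem hnd
    have hx := hmem x (by simp)
    have hrowC : (b.getD x.toNat []).length = C := by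
      rw [List.getD_eq_getElem?_getD, List.getElem?_eq_getElem hx.2]
      exact hb _ (List.getElem_mem hx.2)
    have hstep : (PySem.List.pyRange 0 ((pvRow b x).length : Int) 1).foldl (fun acc2 y =>
          fall2 (y.toNat+1) x y (y-1) acc2) b
        = b.set x.toNat (lup C (b.getD x.toNat [])) := by
      rw [pvRow_length hb hx.1 hx.2, phase2_inner x hx.1 C b]
    have hrect1 : Rect (b.set x.toNat (lup C (b.getD x.toNat []))) C :=
      Rect_set hb (by rw [length_lup, hrowC])
    have hih := ih (b.set x.toNat (lup C (b.getD x.toNat []))) hrect1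
      (by
        intro x' hx'
        have := hmem x' (by simp [hx'])
        exact ⟨this.1, by rw [List.length_set]; exact this.2⟩)
      hnd.of_cons
    rw [List.foldl_cons, hstep]
    refine ⟨by rw [hih.1, List.length_set], ?_⟩
    intro i hi
    rw [hih.2 i (by rw [List.length_set]; exact hi)]
    by_cases hix : i = x.toNat
    · have hiInt : (i:Int) = x := by omega
      have hnot : (i:Int) ∉ xs := by
        rw [hiInt]
        exact (List.nodup_cons.mp hnd).1
      rw [if_neg hnot, if_pos (by simp [hiInt]), hix, row_getD_set_self _ hx.2]
    · have hiInt : (i:Int) ≠ x := by omega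
      rw [row_getD_set_ne _ (by omega)]
      by_cases hin : (i:Int) ∈ xs
      · rw [if_pos hin, if_pos (by simp [hin])]
      · rw [if_neg hin, if_neg (by simp [hiInt, hin])]


theorem refactor_spec' : ∀ (node_info : List (List String)),
    Pre_refactor node_info → refactor node_info = refactor_alt node_info := by
  intro b hpre
  set C := (b.headD []).length with hC
  have hb : Rect b C := hpre
  by_cases hR : b.length = 0
  · have hnil : b = [] := List.length_eq_zero_iff.mp hR
    subst hnil
    rfl
  · simp only [refactor]
    have hmem1 : ∀ x ∈ PySem.List.pyRange ((b.length:Int) - 1) (-1) (-1),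
        0 ≤ x ∧ x.toNat < b.length := by
      intro x hxm
      rw [PySem.List.mem_pyRange_neg_one] at hxm
      exact ⟨by omega, by omega⟩
    obtain ⟨hlen1, hrect1, hcol1⟩ := phase1_outer C
      (PySem.List.pyRange ((b.length:Int) - 1) (-1) (-1)) b hb hmem1
    set b1 := (PySem.List.pyRange ((b.length:Int) - 1) (-1) (-1)).foldl (fun acc x =>
      (PySem.List.pyRange (((pvRow acc x).length : Int) - 1) (-1) (-1)).foldl (fun acc2 y =>
        fall1 acc2.length x y (x+1) acc2) acc) b with hb1def
    have hcolb1 : ∀ w : Nat, w < C → colOf b1 w = compactD (colOf b w) := by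
      intro w hw
      rw [hcol1 w hw, foldl_cfall_pyRange b.length b.length (colOf b w),
        gdown_spec b.length (colOf b w) b.length (by rw [length_colOf])
          (by rw [List.drop_eq_nil_of_le (by rw [length_colOf])]; rfl)]
    have hmem2 : ∀ x ∈ PySem.List.pyRange 0 (b.length:Int) 1, 0 ≤ x ∧ x.toNat < b1.length := by
      intro x hxm
      rw [PySem.List.mem_pyRange_one] at hxm
      exact ⟨hxm.1, by rw [hlen1]; omega⟩
    obtain ⟨hlen2, hrow2⟩ := phase2_outer C (PySem.List.pyRange 0 (b.length:Int) 1) b1 hrect1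
      hmem2 (PySem.List.nodup_pyRange_one _ _)
    have hrowlen : ∀ i : Nat, i < b.length → (b1.getD i []).length = C := by
      intro i hi
      rw [List.getD_eq_getElem?_getD, List.getElem?_eq_getElem (by rw [hlen1]; omega),
        Option.getD_some]
      exact hrect1 _ (List.getElem_mem _)
    have hfinal : ∀ i : Nat, i < b.length →
        ((PySem.List.pyRange 0 (b.length:Int) 1).foldl (fun acc x =>
          (PySem.List.pyRange 0 ((pvRow acc x).length : Int) 1).foldl (fun acc2 y =>
            fall2 (y.toNat+1) x y (y-1) acc2) acc) b1).getD i [] = compactL (b1.getD i []) := by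
      intro i hi
      rw [hrow2 i (by rw [hlen1]; omega), if_pos (by rw [PySem.List.mem_pyRange_one]; omega),
        lup_spec C _ (by rw [hrowlen i hi]), List.take_of_length_le (by rw [hrowlen i hi]),
        List.drop_eq_nil_of_le (by rw [hrowlen i hi]), List.append_nil]
    have halt : refactor_alt b = (List.range b.length).map (fun i => compactL (b1.getD i [])) := by
      simp only [refactor_alt]
      rw [if_neg hR, ← hC]
      apply List.ext_getElem
      · simp
      · intro i h1 h2
        simp only [List.getElem_map, List.getElem_range]
        have hib : i < b.length := by simpa using h2
        have hinner : (List.range C).map (fun y =>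
            (((List.range C).map (fun y =>
              List.replicate (b.length - (((List.range b.length).map (fun x =>
                (b.getD x []).getD y "")).filter (fun s => s ≠ "#")).length) "#"
              ++ ((List.range b.length).map (fun x =>
                (b.getD x []).getD y "")).filter (fun s => s ≠ "#"))).getD y []).getD i "")
            = (List.range C).map (fun y => (b1.getD i []).getD y "") := by
          apply List.map_congr_left
          intro y hy
          rw [PySem.List.getD_map_range _ C y [] (List.mem_range.mp hy)]
          rw [map_range_getD b [] (fun r => r.getD y "")]
          rw [show b.length = (colOf b y).length from (length_colOf b y).symm]
          show (compactD (colOf b y)).getD i "" = _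
          rw [← hcolb1 y (List.mem_range.mp hy), colOf_getD b1 y i]
        rw [hinner, show C = (b1.getD i []).length from (hrowlen i hib).symm,
          map_range_getD (b1.getD i []) "" (fun s => s), List.map_id']
        rfl
    rw [halt]
    apply List.ext_getElem
    · rw [hlen2, hlen1]
      simp
    · intro i h1 h2
      have hib : i < b.length := by simpa using h2
      have hL := hfinal i hib
      rw [List.getD_eq_getElem?_getD, List.getElem?_eq_getElem h1, Option.getD_some] at hL
      rw [hL, List.getElem_map, List.getElem_range]

-- ===== VERDICT (by name: the statement is the Claim_ definition above) =====
theorem refactor_spec : Claim_equal_refactor := by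
  intro b _ hpre
  unfold Spec_refactor
  exact refactor_spec' b hpre
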